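-- pv_equiv track=rewrite | github.com/Ai-allen/luna-os | build/classify_firsthop.py | detect_split_layer
-- ===== SOURCE A (Python) =====
-- def first_match(lines: list[str], prefix: str) -> str | None:
--     for line in lines:
--         if prefix in line:
--             return line
--     return None
--
-- def is_runtime_governance_denial(line: str) -> bool:
--     normalized = line.strip().lower()
--     if normalized.startswith("audit ") or normalized.startswith("row "):
--         return False
--     return "driver.bind denied" in line or "allow_device_call denied" in line
--
-- def first_runtime_governance_denial(lines: list[str]) -> str | None:
--     for line in lines:
--         if is_runtime_governance_denial(line):
--             return line
--     return None
--
-- def detect_split_layer(lines: list[str]) -> tuple[str, str]: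
--     before_governance = (
--         ("handoff", "[FWBLK] handoff missing"),
--         ("storage", "[BOOT] lsys read fail"),
--         ("storage", "[AHCI] "),
--         ("storage", "[ATA] "),
--         ("storage", "[DISK] "),
--     )
--     after_governance = (
--         ("display", "[GRAPHICS] framebuffer fail"),
--         ("display", "[DEVICE] display path"),
--         ("input", "[VIRTKBD] pci missing"),
--         ("input", "[DEVICE] input path"),
--     )
--     input_ready = False
--     input_line = first_match(lines, "[DEVICE] input path")
--     input_ctrl = first_match(lines, "[DEVICE] input ctrl ")
--     if input_line and "lane=ready" in input_line:
--         input_ready = True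
--     if input_ctrl and "legacy=i8042" in input_ctrl:
--         input_ready = True
--     for layer, marker in before_governance:
--         line = first_match(lines, marker)
--         if not line:
--             continue
--         if layer == "handoff" and first_match(lines, "[BOOT] lsys super read ok"):
--             continue
--         return layer, line
--     governance_line = first_runtime_governance_denial(lines)
--     if governance_line:
--         return "driver-governance", governance_line
--     for layer, marker in after_governance:
--         line = first_match(lines, marker)
--         if not line:
--             continue
--         if layer == "display" and first_match(lines, "[USER] shell ready"):
--             continue
--         if marker == "[VIRTKBD] pci missing" and input_ready:
--             continue
--         if layer == "input" and line.startswith("[DEVICE] input path") and "lane=ready" in line: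
--             continue
--         return layer, line
--     return "none", "(none)"
-- ===== SOURCE B (Python) =====
-- def _denied(line: str) -> bool:
--     normalized = line.strip().lower()
--     if normalized.startswith("audit ") or normalized.startswith("row "):
--         return False
--     return "driver.bind denied" in line or "allow_device_call denied" in line
--
-- def detect_split_layer(lines: list[str]) -> tuple[str, str]:
--     # one pass: remember the first line carrying each marker of interest
--     handoff = lsys_fail = ahci = ata = disk = super_ok = None
--     gfx = disp = shell = virtkbd = inpath = inctrl = gov = None
--     for line in lines:
--         if handoff is None and "[FWBLK] handoff missing" in line:
--             handoff = line
--         if lsys_fail is None and "[BOOT] lsys read fail" in line: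
--             lsys_fail = line
--         if ahci is None and "[AHCI] " in line:
--             ahci = line
--         if ata is None and "[ATA] " in line:
--             ata = line
--         if disk is None and "[DISK] " in line:
--             disk = line
--         if super_ok is None and "[BOOT] lsys super read ok" in line:
--             super_ok = line
--         if gfx is None and "[GRAPHICS] framebuffer fail" in line:
--             gfx = line
--         if disp is None and "[DEVICE] display path" in line:
--             disp = line
--         if shell is None and "[USER] shell ready" in line:
--             shell = line
--         if virtkbd is None and "[VIRTKBD] pci missing" in line:
--             virtkbd = line
--         if inpath is None and "[DEVICE] input path" in line:
--             inpath = line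
--         if inctrl is None and "[DEVICE] input ctrl " in line:
--             inctrl = line
--         if gov is None and _denied(line):
--             gov = line
--     input_ready = bool((inpath and "lane=ready" in inpath) or
--                        (inctrl and "legacy=i8042" in inctrl))
--     # flattened priority chain over the precomputed table
--     if handoff and not super_ok:
--         return "handoff", handoff
--     if lsys_fail:
--         return "storage", lsys_fail
--     if ahci:
--         return "storage", ahci
--     if ata:
--         return "storage", ata
--     if disk:
--         return "storage", disk
--     if gov:
--         return "driver-governance", gov
--     if gfx and not shell:
--         return "display", gfx
--     if disp and not shell:
--         return "display", disp
--     if virtkbd and not input_ready and not (virtkbd.startswith("[DEVICE] input path") and "lane=ready" in virtkbd):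
--         return "input", virtkbd
--     if inpath and not (inpath.startswith("[DEVICE] input path") and "lane=ready" in inpath):
--         return "input", inpath
--     return "none", "(none)"
-- ===== Notes on version B (the rewrite author's own statement) =====
-- stated objective: simpler
-- what changed: B replaces A's repeated first_match scans (one scan of lines per marker, some markers scanned twice) by a single pass that records the first line containing each marker and the first governance-denial line, then reads the same priority decision tree as a flat if-chain from those precomputed values.
import Mathlib
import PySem

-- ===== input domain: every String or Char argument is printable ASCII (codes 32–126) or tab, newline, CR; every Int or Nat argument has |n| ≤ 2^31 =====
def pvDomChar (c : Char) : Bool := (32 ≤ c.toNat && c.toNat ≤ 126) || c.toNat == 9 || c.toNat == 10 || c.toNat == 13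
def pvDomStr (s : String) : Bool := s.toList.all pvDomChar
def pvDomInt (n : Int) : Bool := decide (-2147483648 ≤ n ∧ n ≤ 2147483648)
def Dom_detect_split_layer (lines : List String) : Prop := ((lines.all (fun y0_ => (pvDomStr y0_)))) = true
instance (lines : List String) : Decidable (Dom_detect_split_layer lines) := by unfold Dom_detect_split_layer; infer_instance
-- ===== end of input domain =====

-- B replaces A's one-scan-per-marker first_match calls by a single pass recording the first
-- line per marker, then the same priority decision tree as a flat if-chain (objective: simpler).

-- ===== PORT A =====
def first_match (lines : List String) (pre : String) : Option String :=
  match lines with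
  | [] => none
  | line :: rest => if PySem.Str.isIn pre line then some line else first_match rest pre

def is_runtime_governance_denial (line : String) : Bool :=
  let normalized := PySem.Str.lower (PySem.Str.strip line)
  if PySem.Str.startswith normalized "audit " || PySem.Str.startswith normalized "row " then
    false
  else
    PySem.Str.isIn "driver.bind denied" line || PySem.Str.isIn "allow_device_call denied" line

def first_runtime_governance_denial (lines : List String) : Option String :=
  match lines with
  | [] => none
  | line :: rest =>
    if is_runtime_governance_denial line then some line else first_runtime_governance_denial rest

-- Python truthiness of an Optional[str]
def strTruthy (o : Option String) : Bool :=
  match o with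
  | none => false
  | some s => s ≠ ""

-- the 'for layer, marker in before_governance' loop (continue = recurse, return = some)
def beforeLoop (lines : List String) : List (String × String) → Option (String × String)
  | [] => none
  | (layer, marker) :: rest =>
    match first_match lines marker with
    | none => beforeLoop lines rest
    | some line =>
      if line = "" then beforeLoop lines rest
      else if layer = "handoff" && strTruthy (first_match lines "[BOOT] lsys super read ok") then
        beforeLoop lines rest
      else some (layer, line)

-- the 'for layer, marker in after_governance' loop
def afterLoop (lines : List String) (input_ready : Bool) : List (String × String) → Option (String × String)
  | [] => none
  | (layer, marker) :: rest =>
    match first_match lines marker with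
    | none => afterLoop lines input_ready rest
    | some line =>
      if line = "" then afterLoop lines input_ready rest
      else if layer = "display" && strTruthy (first_match lines "[USER] shell ready") then
        afterLoop lines input_ready rest
      else if marker = "[VIRTKBD] pci missing" && input_ready then
        afterLoop lines input_ready rest
      else if layer = "input" && PySem.Str.startswith line "[DEVICE] input path"
             && PySem.Str.isIn "lane=ready" line then
        afterLoop lines input_ready rest
      else some (layer, line)

def detect_split_layer (lines : List String) : String × String :=
  let before_governance : List (String × String) :=
    [("handoff", "[FWBLK] handoff missing"),
     ("storage", "[BOOT] lsys read fail"),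
     ("storage", "[AHCI] "),
     ("storage", "[ATA] "),
     ("storage", "[DISK] ")]
  let after_governance : List (String × String) :=
    [("display", "[GRAPHICS] framebuffer fail"),
     ("display", "[DEVICE] display path"),
     ("input", "[VIRTKBD] pci missing"),
     ("input", "[DEVICE] input path")]
  let input_line := first_match lines "[DEVICE] input path"
  let input_ctrl := first_match lines "[DEVICE] input ctrl "
  let input_ready := false
  let input_ready :=
    if strTruthy input_line && PySem.Str.isIn "lane=ready" (input_line.getD "") then true
    else input_ready
  let input_ready :=
    if strTruthy input_ctrl && PySem.Str.isIn "legacy=i8042" (input_ctrl.getD "") then true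
    else input_ready
  match beforeLoop lines before_governance with
  | some r => r
  | none =>
    let governance_line := first_runtime_governance_denial lines
    let tail :=
      match afterLoop lines input_ready after_governance with
      | some r => r
      | none => ("none", "(none)")
    match governance_line with
    | some g => if g = "" then tail else ("driver-governance", g)
    | none => tail

-- ===== PORT B =====
def denied_alt (line : String) : Bool :=
  let normalized := PySem.Str.lower (PySem.Str.strip line)
  if PySem.Str.startswith normalized "audit " || PySem.Str.startswith normalized "row " then
    false
  else
    PySem.Str.isIn "driver.bind denied" line || PySem.Str.isIn "allow_device_call denied" line

-- the thirteen 'first line of interest' slots of B's single pass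
structure ScanSt where
  handoff : Option String
  lsysFail : Option String
  ahci : Option String
  ata : Option String
  disk : Option String
  superOk : Option String
  gfx : Option String
  disp : Option String
  shell : Option String
  virtkbd : Option String
  inpath : Option String
  inctrl : Option String
  gov : Option String
deriving Repr, DecidableEq

-- 'if x is None and marker in line: x = line'
def slot (o : Option String) (marker line : String) : Option String :=
  if o.isSome then o else if PySem.Str.isIn marker line then some line else o

def scanStep (st : ScanSt) (line : String) : ScanSt :=
  { handoff := slot st.handoff "[FWBLK] handoff missing" line
    lsysFail := slot st.lsysFail "[BOOT] lsys read fail" line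
    ahci := slot st.ahci "[AHCI] " line
    ata := slot st.ata "[ATA] " line
    disk := slot st.disk "[DISK] " line
    superOk := slot st.superOk "[BOOT] lsys super read ok" line
    gfx := slot st.gfx "[GRAPHICS] framebuffer fail" line
    disp := slot st.disp "[DEVICE] display path" line
    shell := slot st.shell "[USER] shell ready" line
    virtkbd := slot st.virtkbd "[VIRTKBD] pci missing" line
    inpath := slot st.inpath "[DEVICE] input path" line
    inctrl := slot st.inctrl "[DEVICE] input ctrl " line
    gov := if st.gov.isSome then st.gov else if denied_alt line then some line else st.gov }

def scanInit : ScanSt :=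
  ⟨none, none, none, none, none, none, none, none, none, none, none, none, none⟩

-- Python truthiness of an Optional[str] (B side)
def truthy (o : Option String) : Bool :=
  match o with
  | none => false
  | some s => s ≠ ""

def detect_split_layer_alt (lines : List String) : String × String :=
  let st := lines.foldl scanStep scanInit
  let input_ready :=
    (truthy st.inpath && PySem.Str.isIn "lane=ready" (st.inpath.getD "")) ||
    (truthy st.inctrl && PySem.Str.isIn "legacy=i8042" (st.inctrl.getD ""))
  if truthy st.handoff && !truthy st.superOk then ("handoff", st.handoff.getD "")
  else if truthy st.lsysFail then ("storage", st.lsysFail.getD "")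
  else if truthy st.ahci then ("storage", st.ahci.getD "")
  else if truthy st.ata then ("storage", st.ata.getD "")
  else if truthy st.disk then ("storage", st.disk.getD "")
  else if truthy st.gov then ("driver-governance", st.gov.getD "")
  else if truthy st.gfx && !truthy st.shell then ("display", st.gfx.getD "")
  else if truthy st.disp && !truthy st.shell then ("display", st.disp.getD "")
  else if truthy st.virtkbd && !input_ready
       && !(PySem.Str.startswith (st.virtkbd.getD "") "[DEVICE] input path"
            && PySem.Str.isIn "lane=ready" (st.virtkbd.getD "")) then
    ("input", st.virtkbd.getD "")
  else if truthy st.inpath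
       && !(PySem.Str.startswith (st.inpath.getD "") "[DEVICE] input path"
            && PySem.Str.isIn "lane=ready" (st.inpath.getD "")) then
    ("input", st.inpath.getD "")
  else ("none", "(none)")

-- ===== PRECONDITION & SPEC =====
def Spec_detect_split_layer (lines : List String) (out : String × String) : Prop := out = detect_split_layer_alt lines
instance (lines : List String) (out : String × String) : Decidable (Spec_detect_split_layer lines out) := by unfold Spec_detect_split_layer; infer_instance

-- ===== CLAIM (what is proved, stated in full; the proofs are below) =====
def Claim_equal_detect_split_layer : Prop := ∀ (lines : List String), Dom_detect_split_layer lines → Spec_detect_split_layer lines (detect_split_layer lines)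

-- ===== LEMMAS AND PROOFS =====

-- each slot of B's fold computes the first matching line (generic over the projection)
theorem slot_foldl (p : ScanSt → Option String) (q : String → Bool)
    (hp : ∀ st l, p (scanStep st l) = if (p st).isSome then p st else if q l then some l else p st) :
    ∀ (lines : List String) (st : ScanSt),
      p (lines.foldl scanStep st) = if (p st).isSome then p st else lines.find? q := by
  intro lines
  induction lines with
  | nil => intro st; cases h : p st <;> simp [h]
  | cons l ls ih =>
    intro st
    simp only [List.foldl_cons, ih, hp, List.find?]
    cases h : p st with
    | some v => simp
    | none => cases q l <;> simp

theorem first_match_eq_find? (lines : List String) (pre : String) :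
    first_match lines pre = lines.find? (fun l => PySem.Str.isIn pre l) := by
  induction lines with
  | nil => rfl
  | cons l ls ih =>
    simp only [first_match, List.find?, ih]
    cases PySem.Str.isIn pre l <;> simp

theorem gov_eq_find? (lines : List String) :
    first_runtime_governance_denial lines = lines.find? is_runtime_governance_denial := by
  induction lines with
  | nil => rfl
  | cons l ls ih =>
    simp only [first_runtime_governance_denial, List.find?, ih]
    cases is_runtime_governance_denial l <;> simp

theorem scan_handoff (lines : List String) :
    (lines.foldl scanStep scanInit).handoff = lines.find? (fun l => PySem.Str.isIn "[FWBLK] handoff missing" l) := by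
  simpa [scanInit] using slot_foldl (fun st => st.handoff) _ (fun st l => rfl) lines scanInit
theorem scan_lsysFail (lines : List String) :
    (lines.foldl scanStep scanInit).lsysFail = lines.find? (fun l => PySem.Str.isIn "[BOOT] lsys read fail" l) := by
  simpa [scanInit] using slot_foldl (fun st => st.lsysFail) _ (fun st l => rfl) lines scanInit
theorem scan_ahci (lines : List String) :
    (lines.foldl scanStep scanInit).ahci = lines.find? (fun l => PySem.Str.isIn "[AHCI] " l) := by
  simpa [scanInit] using slot_foldl (fun st => st.ahci) _ (fun st l => rfl) lines scanInit
theorem scan_ata (lines : List String) :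
    (lines.foldl scanStep scanInit).ata = lines.find? (fun l => PySem.Str.isIn "[ATA] " l) := by
  simpa [scanInit] using slot_foldl (fun st => st.ata) _ (fun st l => rfl) lines scanInit
theorem scan_disk (lines : List String) :
    (lines.foldl scanStep scanInit).disk = lines.find? (fun l => PySem.Str.isIn "[DISK] " l) := by
  simpa [scanInit] using slot_foldl (fun st => st.disk) _ (fun st l => rfl) lines scanInit
theorem scan_superOk (lines : List String) :
    (lines.foldl scanStep scanInit).superOk = lines.find? (fun l => PySem.Str.isIn "[BOOT] lsys super read ok" l) := by
  simpa [scanInit] using slot_foldl (fun st => st.superOk) _ (fun st l => rfl) lines scanInit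
theorem scan_gfx (lines : List String) :
    (lines.foldl scanStep scanInit).gfx = lines.find? (fun l => PySem.Str.isIn "[GRAPHICS] framebuffer fail" l) := by
  simpa [scanInit] using slot_foldl (fun st => st.gfx) _ (fun st l => rfl) lines scanInit
theorem scan_disp (lines : List String) :
    (lines.foldl scanStep scanInit).disp = lines.find? (fun l => PySem.Str.isIn "[DEVICE] display path" l) := by
  simpa [scanInit] using slot_foldl (fun st => st.disp) _ (fun st l => rfl) lines scanInit
theorem scan_shell (lines : List String) :
    (lines.foldl scanStep scanInit).shell = lines.find? (fun l => PySem.Str.isIn "[USER] shell ready" l) := by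
  simpa [scanInit] using slot_foldl (fun st => st.shell) _ (fun st l => rfl) lines scanInit
theorem scan_virtkbd (lines : List String) :
    (lines.foldl scanStep scanInit).virtkbd = lines.find? (fun l => PySem.Str.isIn "[VIRTKBD] pci missing" l) := by
  simpa [scanInit] using slot_foldl (fun st => st.virtkbd) _ (fun st l => rfl) lines scanInit
theorem scan_inpath (lines : List String) :
    (lines.foldl scanStep scanInit).inpath = lines.find? (fun l => PySem.Str.isIn "[DEVICE] input path" l) := by
  simpa [scanInit] using slot_foldl (fun st => st.inpath) _ (fun st l => rfl) lines scanInit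
theorem scan_inctrl (lines : List String) :
    (lines.foldl scanStep scanInit).inctrl = lines.find? (fun l => PySem.Str.isIn "[DEVICE] input ctrl " l) := by
  simpa [scanInit] using slot_foldl (fun st => st.inctrl) _ (fun st l => rfl) lines scanInit
theorem scan_gov (lines : List String) :
    (lines.foldl scanStep scanInit).gov = lines.find? is_runtime_governance_denial := by
  have := slot_foldl (fun st => st.gov) is_runtime_governance_denial
    (fun st l => rfl) lines scanInit
  simpa [scanInit] using this

theorem strTruthy_eq : strTruthy = truthy := rfl

theorem beforeLoop_cons (lines : List String) (lay m : String) (rest : List (String × String)) :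
    beforeLoop lines ((lay, m) :: rest) =
      if truthy (first_match lines m)
         && !(decide (lay = "handoff") && strTruthy (first_match lines "[BOOT] lsys super read ok")) then
        some (lay, (first_match lines m).getD "")
      else beforeLoop lines rest := by
  cases h : first_match lines m with
  | none => simp [beforeLoop, h, truthy]
  | some l =>
    by_cases hl : l = "" <;> simp only [beforeLoop, h, truthy, hl] <;> split_ifs <;> simp_all

theorem afterLoop_cons (lines : List String) (input_ready : Bool) (lay m : String)
    (rest : List (String × String)) :
    afterLoop lines input_ready ((lay, m) :: rest) =
      if truthy (first_match lines m)
         && !(decide (lay = "display") && strTruthy (first_match lines "[USER] shell ready"))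
         && !(decide (m = "[VIRTKBD] pci missing") && input_ready)
         && !(decide (lay = "input")
              && PySem.Str.startswith ((first_match lines m).getD "") "[DEVICE] input path"
              && PySem.Str.isIn "lane=ready" ((first_match lines m).getD "")) then
        some (lay, (first_match lines m).getD "")
      else afterLoop lines input_ready rest := by
  cases h : first_match lines m with
  | none => simp [afterLoop, h, truthy]
  | some l =>
    simp only [afterLoop, h, Option.getD_some]
    cases decide (lay = "display") && strTruthy (first_match lines "[USER] shell ready") <;>
    cases decide (m = "[VIRTKBD] pci missing") && input_ready <;>
    cases decide (lay = "input") && PySem.Str.startswith l "[DEVICE] input path"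
          && PySem.Str.isIn "lane=ready" l <;>
    by_cases hl : l = "" <;> simp [truthy, hl]

theorem beforeLoop_nil (lines : List String) : beforeLoop lines [] = none := rfl

theorem afterLoop_nil (lines : List String) (input_ready : Bool) :
    afterLoop lines input_ready [] = none := rfl

theorem match_getD (o : Option (String × String)) (d : String × String) :
    (match o with | some r => r | none => d) = o.getD d := by
  cases o <;> rfl

theorem getD_ite (c : Prop) [Decidable c] (v : String × String) (rest : Option (String × String))
    (d : String × String) :
    (if c then some v else rest).getD d = if c then v else rest.getD d := by
  split_ifs <;> rfl

theorem gov_stage (o : Option String) (t : String × String) :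
    (match o with
     | some g => if g = "" then t else ("driver-governance", g)
     | none => t) =
      if truthy o then ("driver-governance", o.getD "") else t := by
  cases o with
  | none => simp [truthy]
  | some g => by_cases hg : g = "" <;> simp [truthy, hg]

theorem if_if_or (a b : Bool) : (if a then true else if b then true else false) = (a || b) := by
  cases a <;> cases b <;> rfl

-- ===== VERDICT (by name: the statement is the Claim_ definition above) =====
set_option maxHeartbeats 1000000 in
theorem detect_split_layer_spec : Claim_equal_detect_split_layer := by
  intro lines _
  unfold Spec_detect_split_layer detect_split_layer detect_split_layer_alt
  simp only [beforeLoop_cons, afterLoop_cons, beforeLoop_nil, afterLoop_nil, match_getD, getD_ite,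
    gov_stage, Option.getD_none, if_if_or, strTruthy_eq, first_match_eq_find?, gov_eq_find?,
    scan_handoff, scan_lsysFail, scan_ahci, scan_ata, scan_disk, scan_superOk,
    scan_gfx, scan_disp, scan_shell, scan_virtkbd, scan_inpath, scan_inctrl, scan_gov,
    String.reduceEq, decide_false, decide_true, Bool.true_and,
    Bool.false_and, Bool.and_true, Bool.not_false]
  rw [Bool.or_comm]
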